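-- pv_equiv track=rewrite | github.com/azzy9/plugin.video.rumble | lib/m3u8.py | process
-- ===== SOURCE A (Python) =====
-- def process( m3u8_data ):
--
--     """ method to process the m3u8 files """
--
--     urls = []
--     try:
--         m3u8_data = m3u8_data.rstrip().split('\n')
--         if m3u8_data:
--
--             # sanitise m3u8 data
--             m3u8_data = [item for item in m3u8_data if not item.startswith('#') or 'RESOLUTION' in item ]
--
--             line_amount = 0
--             resolution = ''
--             for line in m3u8_data:
--
--                 if line_amount % 2 == 0:
--                     resolution = line.split('x')
--                     resolution = resolution[-1]
--                 else:
--                     urls.append(( resolution, line ))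
--
--                 line_amount +=1
--
--             urls = urls[::-1]
--
--     except Exception:
--         pass
--
--     return urls
-- ===== SOURCE B (Python) =====
-- def process(m3u8_data):
--
--     """ process the m3u8 file: reversed list of (resolution, url) pairs """
--
--     lines = [l for l in m3u8_data.rstrip().split('\n')
--              if not l.startswith('#') or 'RESOLUTION' in l]
--     if len(lines) % 2:
--         lines.pop()                 # a trailing resolution line has no url: it yields no pair
--     urls = []
--     it = iter(reversed(lines))
--     for url in it:
--         urls.append((next(it).split('x')[-1], url))
--     return urls
-- ===== Notes on version B (the rewrite author's own statement) =====
-- stated objective: alternative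
-- what changed: Replaces A's forward parity-counter state machine plus final urls[::-1] reversal by: drop an unpaired trailing resolution line up front, then walk the filtered lines BACKWARDS with an iterator, consuming the url line first and its resolution line second, appending each pair directly in final order (no loop counter, no remembered-resolution state, no final reversal).
import Mathlib
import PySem

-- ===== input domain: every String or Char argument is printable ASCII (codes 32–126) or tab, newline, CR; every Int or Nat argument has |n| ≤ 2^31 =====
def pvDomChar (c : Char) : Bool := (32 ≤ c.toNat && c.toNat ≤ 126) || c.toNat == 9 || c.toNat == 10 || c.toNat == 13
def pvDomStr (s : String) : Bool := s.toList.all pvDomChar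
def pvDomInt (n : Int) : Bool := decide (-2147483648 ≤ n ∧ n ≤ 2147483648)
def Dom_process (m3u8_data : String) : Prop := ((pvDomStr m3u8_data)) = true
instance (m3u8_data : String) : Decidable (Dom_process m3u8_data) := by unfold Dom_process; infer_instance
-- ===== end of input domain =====

-- B drops an unpaired trailing resolution line up front and then walks the filtered lines
-- BACKWARDS, consuming a url line and then its resolution line, appending each pair directly
-- in final order — no parity counter, no remembered-resolution state, no final reversal.

-- line.split('x')[-1]  (split? is none only for an empty separator, and the split result is never
-- empty, so [-1] never raises)
def pvRes (line : String) : String :=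
  (PySem.List.pyGet? ((PySem.Str.split? line "x").getD []) (-1)).getD ""

-- A's loop body ('if line_amount % 2 == 0: remember resolution; else: append (resolution, line)')
def pvStepA (st : List (String × String) × Int × String) (line : String) :
    List (String × String) × Int × String :=
  if PySem.Int.mod st.2.1 2 == 0 then
    (st.1, st.2.1 + 1, pvRes line)
  else
    (st.1 ++ [(st.2.2, line)], st.2.1 + 1, st.2.2)

-- ===== PORT A =====
def process (m3u8_data : String) : List (String × String) :=
  let ls := (PySem.Str.split? (PySem.Str.rstrip m3u8_data) "\n").getD []
  if ls.isEmpty then []           -- 'if m3u8_data:' on the split result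
  else
    let san := ls.filter (fun item =>
      !(PySem.Str.startswith item "#") || PySem.Str.isIn "RESOLUTION" item)
    let st := san.foldl pvStepA ([], 0, "")
    (PySem.List.slice? st.1 none none (-1)).getD []     -- urls[::-1]

-- ===== PORT B =====
-- B's loop: 'for url in it: urls.append((next(it).split('x')[-1], url))' over the reversed
-- lines; the iterator yields the url line first, then its resolution line
def pvLoopB (acc : List (String × String)) : List String → List (String × String)
  | url :: res :: rest => pvLoopB (acc ++ [(pvRes res, url)]) rest
  | _ => acc                      -- iterator exhausted (the list has even length, so this is [])

def process_alt (m3u8_data : String) : List (String × String) :=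
  let lines0 := ((PySem.Str.split? (PySem.Str.rstrip m3u8_data) "\n").getD []).filter (fun l =>
    !(PySem.Str.startswith l "#") || PySem.Str.isIn "RESOLUTION" l)
  -- 'if len(lines) % 2: lines.pop()' — pop() removes the last element
  let lines := if lines0.length % 2 == 1 then lines0.dropLast else lines0
  pvLoopB [] lines.reverse

-- ===== PRECONDITION & SPEC =====
def Spec_process (m3u8_data : String) (out : List (String × String)) : Prop := out = process_alt m3u8_data
instance (m3u8_data : String) (out : List (String × String)) : Decidable (Spec_process m3u8_data out) := by unfold Spec_process; infer_instance

-- ===== CLAIM (what is proved, stated in full; the proofs are below) =====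
def Claim_equal_process : Prop := ∀ (m3u8_data : String), Dom_process m3u8_data → Spec_process m3u8_data (process m3u8_data)

-- ===== LEMMAS AND PROOFS =====

-- the pairing both programs compute, read directly off the filtered line list
def pairsOf : List String → List (String × String)
  | r :: u :: rest => (pvRes r, u) :: pairsOf rest
  | _ => []

-- A's loop, started at any even counter, appends exactly the pairs of its input
lemma foldA_eq (L : List String) : ∀ (urls : List (String × String)) (m : Int) (r : String),
    (L.foldl pvStepA (urls, 2*m, r)).1 = urls ++ pairsOf L := by
  induction L using pairsOf.induct with
  | case1 a b rest ih =>
      intro urls m r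
      have e1 : pvStepA (urls, 2*m, r) a = (urls, 2*m+1, pvRes a) := by
        simp [pvStepA]
      have e2 : pvStepA (urls, 2*m+1, pvRes a) b = (urls ++ [(pvRes a, b)], 2*(m+1), pvRes a) := by
        simp [pvStepA]; ring
      simp only [List.foldl_cons, e1, e2, ih]
      simp [pairsOf]
  | case2 L h =>
      intro urls m r
      match L with
      | [] => simp [pairsOf]
      | [a] =>
        simp only [List.foldl_cons, List.foldl_nil]
        simp [pvStepA, pairsOf]
      | a :: b :: rest => exact absurd rfl (fun hh => h a b rest hh)

-- B's loop splits over an even-length prefix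
lemma pvLoopB_append_even (L1 : List String) (h : L1.length % 2 = 0) :
    ∀ (L2 : List String) (acc : List (String × String)),
    pvLoopB acc (L1 ++ L2) = pvLoopB (pvLoopB acc L1) L2 := by
  induction L1 using pairsOf.induct with
  | case1 a b rest ih =>
      intro L2 acc
      have hr : rest.length % 2 = 0 := by simp [List.length_cons] at h; omega
      simp only [List.cons_append, pvLoopB]
      exact ih hr L2 _
  | case2 L hne =>
      intro L2 acc
      match L with
      | [] => simp [pvLoopB]
      | [a] => simp at h
      | a :: b :: rest => exact absurd rfl (fun hh => hne a b rest hh)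

-- on a reversed even-length list, B's loop produces exactly A's pairs reversed
lemma pvLoopB_reverse (L : List String) (h : L.length % 2 = 0) :
    pvLoopB [] L.reverse = (pairsOf L).reverse := by
  induction L using pairsOf.induct with
  | case1 a b rest ih =>
      have hr : rest.length % 2 = 0 := by simp [List.length_cons] at h; omega
      have hrev : (a :: b :: rest).reverse = rest.reverse ++ [b, a] := by simp
      have heven : rest.reverse.length % 2 = 0 := by simpa using hr
      rw [hrev, pvLoopB_append_even _ heven, ih hr]
      simp [pvLoopB, pairsOf]
  | case2 L hne =>
      match L with
      | [] => simp [pvLoopB, pairsOf]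
      | [a] => simp at h
      | a :: b :: rest => exact absurd rfl (fun hh => hne a b rest hh)

-- dropping the trailing unpaired line of an odd-length list does not change the pairing
lemma pairsOf_dropLast_odd (L : List String) (h : L.length % 2 = 1) :
    pairsOf L.dropLast = pairsOf L := by
  induction L using pairsOf.induct with
  | case1 a b rest ih =>
      have hr : rest.length % 2 = 1 := by simp [List.length_cons] at h; omega
      have hne : rest ≠ [] := by intro hh; rw [hh] at hr; simp at hr
      have : (a :: b :: rest).dropLast = a :: b :: rest.dropLast := by
        simp [List.dropLast_cons_of_ne_nil, hne]
      rw [this, pairsOf, pairsOf, ih hr]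
  | case2 L hne =>
      match L with
      | [] => simp at h
      | [a] => simp [pairsOf]
      | a :: b :: rest => exact absurd rfl (fun hh => hne a b rest hh)

-- ===== VERDICT (by name: the statement is the Claim_ definition above) =====
theorem process_spec : Claim_equal_process := by
  intro s _
  unfold Spec_process process process_alt
  set ls := (PySem.Str.split? (PySem.Str.rstrip s) "\n").getD [] with hls
  set san := ls.filter (fun item =>
      !(PySem.Str.startswith item "#") || PySem.Str.isIn "RESOLUTION" item) with hsan
  have hA2 : ∀ L : List String, (L.foldl pvStepA ([], (0:Int), "")).1 = pairsOf L := by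
    intro L
    have : (0:Int) = 2*0 := by norm_num
    rw [this, foldA_eq]; simp
  have hB : (if san.length % 2 == 1 then san.dropLast else san).length % 2 = 0 := by
    by_cases hodd : san.length % 2 = 1
    · have hne : san ≠ [] := by intro hh; rw [hh] at hodd; simp at hodd
      simp only [hodd]
      simp [List.length_dropLast]
      omega
    · simp only [beq_iff_eq, if_neg hodd]
      omega
  have hpairs : pairsOf (if san.length % 2 == 1 then san.dropLast else san) = pairsOf san := by
    by_cases hodd : san.length % 2 = 1
    · simp only [hodd]
      simp [pairsOf_dropLast_odd san hodd]
    · simp [hodd]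
  by_cases hempty : ls.isEmpty
  · have h0 : ls = [] := List.isEmpty_iff.mp hempty
    have hs0 : san = [] := by rw [hsan, h0]; rfl
    simp only [hempty, if_true]
    rw [hs0] at hB hpairs ⊢
    rw [pvLoopB_reverse _ hB, hpairs]
    simp [pairsOf]
  · simp only [hempty, if_false, Bool.false_eq_true]
    rw [hA2, PySem.List.slice?_none_none_neg_one, pvLoopB_reverse _ hB, hpairs, ← hsan]
    simp only [Option.getD_some]
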